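-- pv_equiv track=rewrite | github.com/tomanizer/markdown-converter | src/markdown_converter/processors/table_processor.py | _detect_table_format
-- ===== SOURCE A (Python) =====
-- from typing import Dict, Any, Optional, List, Union, Tuple
--
-- def _detect_table_format(lines: List[str]) -> Optional[str]:
--     """
--     Detect the format of table lines.
--
--     :param lines: Lines to analyze
--     :return: Format type ('markdown', 'csv', 'tsv', 'space')
--     """
--     if not lines:
--         return None
--
--     # Check for markdown table format
--     if any('|' in line for line in lines):
--         return 'markdown'
--
--     # Check for CSV format
--     if any(',' in line for line in lines):
--         return 'csv'
--
--     # Check for TSV format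
--     if any('\t' in line for line in lines):
--         return 'tsv'
--
--     # Check for space-separated format
--     return 'space'
-- ===== SOURCE B (Python) =====
-- from typing import Optional, List
--
-- def _detect_table_format(lines: List[str]) -> Optional[str]:
--     """Single stateful pass: early-return 'markdown', else accumulate flags."""
--     if not lines:
--         return None
--     has_comma = False
--     has_tab = False
--     for line in lines:
--         if '|' in line:
--             return 'markdown'
--         if ',' in line:
--             has_comma = True
--         if '\t' in line:
--             has_tab = True
--     if has_comma:
--         return 'csv'
--     if has_tab:
--         return 'tsv'
--     return 'space'
-- ===== Notes on version B (the rewrite author's own statement) =====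
-- stated objective: faster
-- what changed: Replaced three independent any()-scans over the whole list by one stateful pass that early-returns 'markdown' and accumulates has_comma/has_tab flags.
import Mathlib
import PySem

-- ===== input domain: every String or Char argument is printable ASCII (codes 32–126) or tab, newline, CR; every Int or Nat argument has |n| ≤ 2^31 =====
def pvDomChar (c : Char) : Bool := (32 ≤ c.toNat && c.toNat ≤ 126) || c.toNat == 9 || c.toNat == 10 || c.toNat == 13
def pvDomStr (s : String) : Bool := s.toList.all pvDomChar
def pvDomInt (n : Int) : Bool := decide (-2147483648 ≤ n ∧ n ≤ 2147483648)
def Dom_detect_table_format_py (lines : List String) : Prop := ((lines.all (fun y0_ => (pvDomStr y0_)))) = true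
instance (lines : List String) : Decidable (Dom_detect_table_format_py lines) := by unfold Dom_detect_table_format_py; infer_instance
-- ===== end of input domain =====

-- B fuses A's three independent any()-scans into one stateful pass with flags; same results, objective: alternative.

-- ===== PORT A =====
def detect_table_format_py (lines : List String) : Option String :=
  if lines = [] then none
  else if lines.any (fun line => PySem.Str.isIn "|" line) then some "markdown"
  else if lines.any (fun line => PySem.Str.isIn "," line) then some "csv"
  else if lines.any (fun line => PySem.Str.isIn "\t" line) then some "tsv"
  else some "space"

-- ===== PORT B =====
def detectLoop : List String → Bool → Bool → Option String
  | [], has_comma, has_tab =>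
      if has_comma then some "csv" else if has_tab then some "tsv" else some "space"
  | line :: rest, has_comma, has_tab =>
      if PySem.Str.isIn "|" line then some "markdown"
      else detectLoop rest (has_comma || PySem.Str.isIn "," line) (has_tab || PySem.Str.isIn "\t" line)

def detect_table_format_py_alt (lines : List String) : Option String :=
  if lines = [] then none else detectLoop lines false false

-- ===== PRECONDITION & SPEC =====
def Spec_detect_table_format_py (lines : List String) (out : Option String) : Prop := out = detect_table_format_py_alt lines
instance (lines : List String) (out : Option String) : Decidable (Spec_detect_table_format_py lines out) := by unfold Spec_detect_table_format_py; infer_instance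

-- ===== CLAIM (what is proved, stated in full; the proofs are below) =====
def Claim_equal_detect_table_format_py : Prop := ∀ (lines : List String), Dom_detect_table_format_py lines → Spec_detect_table_format_py lines (detect_table_format_py lines)

-- ===== LEMMAS AND PROOFS =====

theorem detectLoop_eq (lines : List String) (hc ht : Bool) :
    detectLoop lines hc ht =
      (if lines.any (fun line => PySem.Str.isIn "|" line) then some "markdown"
       else if hc || lines.any (fun line => PySem.Str.isIn "," line) then some "csv"
       else if ht || lines.any (fun line => PySem.Str.isIn "\t" line) then some "tsv"
       else some "space") := by
  induction lines generalizing hc ht with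
  | nil => simp [detectLoop]
  | cons l rest ih =>
      simp only [detectLoop, List.any_cons]
      by_cases h1 : PySem.Str.isIn "|" l = true
      · rw [h1]
        simp only [Bool.true_or, reduceIte]
      · rw [Bool.not_eq_true] at h1
        rw [h1, ih]
        simp only [Bool.false_or, Bool.or_assoc]
        rfl

-- ===== VERDICT (by name: the statement is the Claim_ definition above) =====
theorem detect_table_format_py_spec : Claim_equal_detect_table_format_py := by
  intro lines _
  unfold Spec_detect_table_format_py detect_table_format_py detect_table_format_py_alt
  by_cases h : lines = []
  · simp [h]
  · simp only [h, if_false]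
    rw [detectLoop_eq]
    simp
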